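-- pv_equiv track=rewrite | github.com/fandr-fa/LarLocaAnalyzer | LarLocaAnalyzer.py | is_british_spelling
-- ===== SOURCE A (Python) =====
-- def is_british_spelling(word1, word2):
--     if len(word1) != len(word2):
--         return False
--
--     index = -1
--     for i in range(len(word1)):
--         if word1[i] != word2[i]:
--             if index != -1:
--                 return False
--             index = i
--
--     if index == -1 or word1[index] != 's' or word2[index] != 'z':
--         return False
--
--     return True
-- ===== SOURCE B (Python) =====
-- def is_british_spelling(word1, word2):
--     return any(word1[:i] + 'z' + word1[i + 1:] == word2
--                for i in range(len(word1)) if word1[i] == 's')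
-- ===== Notes on version B (the rewrite author's own statement) =====
-- stated objective: alternative
-- what changed: Instead of A's single scan that tracks the unique differing index and then checks it is an s/z pair, B enumerates every position of word1 holding 's', builds the candidate word with 'z' substituted there, and returns whether any candidate equals word2.
import Mathlib
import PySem

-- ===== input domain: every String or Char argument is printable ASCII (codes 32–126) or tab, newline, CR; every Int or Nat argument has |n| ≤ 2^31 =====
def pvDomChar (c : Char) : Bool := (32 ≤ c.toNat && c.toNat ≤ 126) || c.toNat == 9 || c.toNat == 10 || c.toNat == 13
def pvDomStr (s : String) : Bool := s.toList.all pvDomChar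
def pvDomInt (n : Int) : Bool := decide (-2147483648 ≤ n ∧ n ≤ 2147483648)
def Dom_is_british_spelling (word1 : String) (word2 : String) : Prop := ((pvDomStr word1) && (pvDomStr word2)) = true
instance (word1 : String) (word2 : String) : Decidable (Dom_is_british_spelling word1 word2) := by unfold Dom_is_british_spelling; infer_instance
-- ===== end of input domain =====

-- B enumerates the candidate single s→z edits of word1 and compares whole strings,
-- instead of A's single scan tracking the unique differing index (objective: alternative).

-- ===== PORT A =====
-- the for-loop of A: walks both words in step, `i` is the running position,
-- `index` the index of the first mismatch (-1 = none yet); none = early `return False`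
def aLoop : List Char → List Char → Int → Int → Option Int
  | [], _, _, index => some index
  | _ :: _, [], _, index => some index
  | c1 :: r1, c2 :: r2, i, index =>
      if c1 ≠ c2 then
        if index ≠ -1 then none else aLoop r1 r2 (i + 1) i
      else aLoop r1 r2 (i + 1) index

-- the code after the loop (A's final `if`)
def aCheck (l1 l2 : List Char) : Bool :=
  match aLoop l1 l2 0 (-1) with
  | none => false
  | some index =>
      if index = -1 ∨ PySem.List.pyGet? l1 index ≠ some 's' ∨ PySem.List.pyGet? l2 index ≠ some 'z'
      then false else true

def is_british_spelling (word1 : String) (word2 : String) : Bool :=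
  let l1 := word1.toList
  let l2 := word2.toList
  if l1.length ≠ l2.length then false
  else aCheck l1 l2

-- ===== PORT B =====
-- word1[:i] + 'z' + word1[i+1:] == word2, for i in range with word1[i] == 's'
-- (the slices with 0 ≤ i < len are exactly take/drop)
def bAny (l1 l2 : List Char) : Bool :=
  (List.range l1.length).any fun i =>
    if l1[i]? = some 's' then decide (l1.take i ++ 'z' :: l1.drop (i + 1) = l2) else false

def is_british_spelling_alt (word1 : String) (word2 : String) : Bool :=
  bAny word1.toList word2.toList

-- ===== PRECONDITION & SPEC =====
def Spec_is_british_spelling (word1 : String) (word2 : String) (out : Bool) : Prop := out = is_british_spelling_alt word1 word2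
instance (word1 : String) (word2 : String) (out : Bool) : Decidable (Spec_is_british_spelling word1 word2 out) := by unfold Spec_is_british_spelling; infer_instance

-- ===== CLAIM (what is proved, stated in full; the proofs are below) =====
def Claim_equal_is_british_spelling : Prop := ∀ (word1 : String) (word2 : String), Dom_is_british_spelling word1 word2 → Spec_is_british_spelling word1 word2 (is_british_spelling word1 word2)

-- ===== LEMMAS AND PROOFS =====

-- common reference function both ports are reduced to
def oneSZ : List Char → List Char → Bool
  | [], _ => false
  | _ :: _, [] => false
  | c1 :: r1, c2 :: r2 =>
      if c1 = c2 then oneSZ r1 r2 else decide (c1 = 's' ∧ c2 = 'z' ∧ r1 = r2)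

theorem oneSZ_length {l1 l2 : List Char} (h : oneSZ l1 l2 = true) : l1.length = l2.length := by
  induction l1 generalizing l2 with
  | nil => cases l2 <;> simp [oneSZ] at h
  | cons c1 r1 ih =>
    cases l2 with
    | nil => simp [oneSZ] at h
    | cons c2 r2 =>
      simp only [oneSZ] at h
      split at h
      · simpa using ih h
      · simp only [decide_eq_true_eq] at h
        simp [h.2.2]

theorem oneSZ_self (l : List Char) : oneSZ l l = false := by
  induction l with
  | nil => rfl
  | cons c r ih => simp [oneSZ, ih]

theorem bAny_eq_oneSZ (l1 l2 : List Char) : bAny l1 l2 = oneSZ l1 l2 := by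
  induction l1 generalizing l2 with
  | nil => cases l2 <;> simp [bAny, oneSZ]
  | cons c1 r1 ih =>
    cases l2 with
    | nil =>
      simp only [bAny, oneSZ, List.length_cons, List.range_succ_eq_map, List.any_cons,
        List.any_map]
      simp [Function.comp_def]
    | cons c2 r2 =>
      simp only [bAny, oneSZ, List.length_cons, List.range_succ_eq_map, List.any_cons,
        List.any_map, Function.comp_def, List.getElem?_cons_succ, List.getElem?_cons_zero,
        List.take_succ_cons, List.drop_succ_cons, List.take_zero,
        List.nil_append, List.cons_eq_cons]
      by_cases hc : c1 = c2
      · subst hc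
        by_cases hs : c1 = 's'
        · subst hs
          have hz : ¬ (('z' : Char) = 's') := by decide
          simp only [← ih r2, bAny]
          simp [hz]
        · simp only [← ih r2, bAny]
          simp [hs]
      · by_cases hs : c1 = 's'
        · subst hs
          simp [hc, @eq_comm _ ('z' : Char)]
        · simp [hc, hs]

-- aLoop with a non-(-1) accumulator: early-returns none iff some later pair mismatches
theorem aLoop_pos (l1 l2 : List Char) (i idx : Int) (h : idx ≠ -1) :
    aLoop l1 l2 i idx = if ((l1.zip l2).all fun p => p.1 == p.2) then some idx else none := by
  induction l1 generalizing l2 i with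
  | nil => cases l2 <;> simp [aLoop]
  | cons c1 r1 ih =>
    cases l2 with
    | nil => simp [aLoop]
    | cons c2 r2 =>
      by_cases hc : c1 = c2
      · simp only [aLoop, if_neg (not_not_intro hc), ih r2 (i+1)]
        simp [hc]
      · simp only [aLoop, if_pos hc, if_pos h]
        simp [hc]

theorem zip_all_eq {l1 l2 : List Char} (h : l1.length = l2.length) :
    ((l1.zip l2).all fun p => p.1 == p.2) = decide (l1 = l2) := by
  induction l1 generalizing l2 with
  | nil => cases l2 with
    | nil => simp
    | cons _ _ => simp at h
  | cons c1 r1 ih =>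
    cases l2 with
    | nil => simp at h
    | cons c2 r2 =>
      simp only [List.length_cons, Nat.add_right_cancel_iff] at h
      by_cases hcc : c1 = c2 <;> simp [hcc, ih h]

-- shifting the position counter by one
theorem aLoop_succ (l1 l2 : List Char) (i : Nat) :
    aLoop l1 l2 ((i : Int) + 1) (-1) =
      Option.map (fun x => if x = -1 then -1 else x + 1) (aLoop l1 l2 (i : Int) (-1)) := by
  induction l1 generalizing l2 i with
  | nil => cases l2 <;> simp [aLoop]
  | cons c1 r1 ih =>
    cases l2 with
    | nil => simp [aLoop]
    | cons c2 r2 =>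
      by_cases hc : c1 = c2
      · simp only [aLoop, if_neg (not_not_intro hc)]
        rw [show (i : Int) + 1 + 1 = ((i + 1 : Nat) : Int) + 1 by push_cast; ring,
          show (i : Int) + 1 = ((i + 1 : Nat) : Int) by push_cast; ring, ih r2 (i+1)]
      · have hi : (i : Int) ≠ -1 := by omega
        have hi1 : (i : Int) + 1 ≠ -1 := by omega
        simp only [aLoop, if_pos hc, if_neg (fun hh => hh rfl : ¬((-1:Int) ≠ -1)),
          aLoop_pos r1 r2 ((i:Int)+1+1) ((i:Int)+1) hi1, aLoop_pos r1 r2 ((i:Int)+1) (i:Int) hi]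
        split <;> simp [hi]

-- the result of the loop started with accumulator -1 at position i is -1 or ≥ i
theorem aLoop_range (l1 l2 : List Char) (i : Nat) (x : Int)
    (h : aLoop l1 l2 (i : Int) (-1) = some x) : x = -1 ∨ (i : Int) ≤ x := by
  induction l1 generalizing l2 i with
  | nil => cases l2 <;> (simp [aLoop] at h; omega)
  | cons c1 r1 ih =>
    cases l2 with
    | nil => simp [aLoop] at h; omega
    | cons c2 r2 =>
      by_cases hc : c1 = c2
      · simp only [aLoop, if_neg (not_not_intro hc)] at h
        rw [show (i : Int) + 1 = ((i + 1 : Nat) : Int) by push_cast; ring] at h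
        rcases ih r2 (i+1) h with h' | h'
        · exact Or.inl h'
        · right; omega
      · simp only [aLoop, if_pos hc, if_neg (fun hh => hh rfl : ¬((-1:Int) ≠ -1)),
          aLoop_pos r1 r2 ((i:Int)+1) (i:Int) (by omega)] at h
        split at h <;> simp at h <;> omega

theorem aCheck_eq_oneSZ (l1 l2 : List Char) (h : l1.length = l2.length) :
    aCheck l1 l2 = oneSZ l1 l2 := by
  induction l1 generalizing l2 with
  | nil =>
    cases l2 with
    | nil => simp [aCheck, aLoop, oneSZ]
    | cons _ _ => simp at h
  | cons c1 r1 ih =>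
    cases l2 with
    | nil => simp at h
    | cons c2 r2 =>
      simp only [List.length_cons, Nat.add_right_cancel_iff] at h
      by_cases hc : c1 = c2
      · -- first characters equal: reduce to the tail via the shift lemma
        have hs := aLoop_succ r1 r2 0
        simp only [Nat.cast_zero, zero_add] at hs
        have hrec := ih r2 h
        simp only [aCheck] at hrec
        simp only [aCheck, aLoop, if_neg (not_not_intro hc), zero_add, oneSZ, if_pos hc]
        rw [hs]
        cases hx : aLoop r1 r2 0 (-1) with
        | none =>
          rw [hx] at hrec
          simpa using hrec
        | some x =>
          rw [hx] at hrec
          rcases aLoop_range r1 r2 0 x (by simpa using hx) with hneg | hpos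
          · subst hneg
            simp at hrec
            simp [hrec]
          · have hxne : x ≠ -1 := by omega
            have hx1 : x + 1 ≠ -1 := by omega
            simp only [Option.map_some, if_neg hxne]
            have g1 : PySem.List.pyGet? (c1 :: r1) (x + 1) = PySem.List.pyGet? r1 x := by
              rw [show x = ((x.toNat : Nat) : Int) by omega]
              exact PySem.List.pyGet?_cons_succ c1 r1 x.toNat
            have g2 : PySem.List.pyGet? (c2 :: r2) (x + 1) = PySem.List.pyGet? r2 x := by
              rw [show x = ((x.toNat : Nat) : Int) by omega]
              exact PySem.List.pyGet?_cons_succ c2 r2 x.toNat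
            rw [g1, g2]
            simp only [hxne, hx1, false_or] at hrec ⊢
            exact hrec
      · -- first mismatch at position 0
        simp only [aCheck, aLoop, if_pos hc, if_neg (fun hh => hh rfl : ¬((-1:Int) ≠ -1)),
          zero_add, aLoop_pos r1 r2 1 0 (by omega), zip_all_eq h]
        by_cases hr : r1 = r2
        · subst hr
          by_cases h1 : c1 = 's' <;> by_cases h2 : c2 = 'z' <;>
            simp [oneSZ, hc, h1, h2, oneSZ_self]
        · simp [hr, oneSZ, hc]

-- ===== VERDICT (by name: the statement is the Claim_ definition above) =====
theorem is_british_spelling_spec : Claim_equal_is_british_spelling := by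
  intro word1 word2 _
  unfold Spec_is_british_spelling is_british_spelling is_british_spelling_alt
  rw [bAny_eq_oneSZ]
  by_cases h : word1.toList.length = word2.toList.length
  · simp [h, aCheck_eq_oneSZ _ _ h]
  · simp only [if_pos h]
    cases hx : oneSZ word1.toList word2.toList
    · rfl
    · exact absurd (oneSZ_length hx) h
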